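-- pv_equiv track=rewrite | github.com/Moras-del/cykle-grafy | implementations/strassen_impl.py | find_common_neighbors
-- ===== SOURCE A (Python) =====
-- def find_common_neighbors(A, vertA, vertB, undirected):
--     results = []
--     if undirected:
--         for neighbor, value in enumerate(A[vertA]):
--             if value > 0 and A[vertB][neighbor] > 0:
--                 results.append(neighbor)
--     else:
--         for neighbor, value in enumerate(A[vertB]):
--             if value > 0 and A[neighbor][vertA] > 0:
--                 results.append(neighbor)
--     return results
-- ===== SOURCE B (Python) =====
-- def find_common_neighbors(A, vertA, vertB, undirected):
--     if undirected:
--         s1 = {i for i, v in enumerate(A[vertA]) if v > 0}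
--         s2 = {i for i, v in enumerate(A[vertB]) if v > 0}
--         return sorted(s1 & s2)
--     s1 = {i for i, v in enumerate(A[vertB]) if v > 0}
--     return sorted(i for i in s1 if A[i][vertA] > 0)
-- ===== Notes on version B (the rewrite author's own statement) =====
-- stated objective: idiomatic
-- what changed: Replaces A's fused append loop with building neighbor-index sets by comprehension, then a set intersection (undirected) or a column filter over the set (directed), with sorted() restoring ascending index order.
-- outside the precondition, e.g. on find_common_neighbors([[0]], 0, 1, True): A returns [], B raises IndexError
import Mathlib
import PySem

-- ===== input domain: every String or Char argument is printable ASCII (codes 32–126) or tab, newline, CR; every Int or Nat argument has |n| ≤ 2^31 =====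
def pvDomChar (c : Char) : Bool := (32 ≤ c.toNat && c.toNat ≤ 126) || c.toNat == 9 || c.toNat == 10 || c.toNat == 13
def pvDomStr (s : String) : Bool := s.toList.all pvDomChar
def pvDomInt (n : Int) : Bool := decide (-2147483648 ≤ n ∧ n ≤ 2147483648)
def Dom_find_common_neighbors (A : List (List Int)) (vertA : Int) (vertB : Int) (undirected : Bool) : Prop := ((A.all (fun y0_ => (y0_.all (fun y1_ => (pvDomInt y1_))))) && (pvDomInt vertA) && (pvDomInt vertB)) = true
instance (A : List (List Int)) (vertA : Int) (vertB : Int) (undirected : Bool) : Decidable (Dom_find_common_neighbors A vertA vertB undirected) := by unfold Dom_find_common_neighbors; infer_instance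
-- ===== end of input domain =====

-- ===== PORT A =====
-- B replaces A's fused append loop by set comprehensions + intersection/filter + sorted (idiomatic; same cost).
def find_common_neighbors (A : List (List Int)) (vertA : Int) (vertB : Int) (undirected : Bool) : List Int :=
  if undirected then
    (PySem.List.enumerate (PySem.List.pyGetD A vertA []) 0).foldl
      (fun results p =>
        if p.2 > 0 ∧ PySem.List.pyGetD (PySem.List.pyGetD A vertB []) p.1 0 > 0
        then results ++ [p.1] else results) []
  else
    (PySem.List.enumerate (PySem.List.pyGetD A vertB []) 0).foldl
      (fun results p =>
        if p.2 > 0 ∧ PySem.List.pyGetD (PySem.List.pyGetD A p.1 []) vertA 0 > 0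
        then results ++ [p.1] else results) []

-- ===== PORT B =====
-- {i for i, v in enumerate(row) if v > 0}
def pvPosSet (row : List Int) : PySem.Set Int :=
  PySem.Set.ofList (((PySem.List.enumerate row 0).filter (fun p => decide (p.2 > 0))).map (fun p => p.1))

def find_common_neighbors_alt (A : List (List Int)) (vertA : Int) (vertB : Int) (undirected : Bool) : List Int :=
  if undirected then
    let s1 := pvPosSet (PySem.List.pyGetD A vertA [])
    let s2 := pvPosSet (PySem.List.pyGetD A vertB [])
    PySem.List.sorted (PySem.Set.inter s1 s2) (fun x => x) false
  else
    let s1 := pvPosSet (PySem.List.pyGetD A vertB [])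
    PySem.List.sorted
      (s1.filter (fun i => decide (PySem.List.pyGetD (PySem.List.pyGetD A i []) vertA 0 > 0)))
      (fun x => x) false

-- ===== PRECONDITION & SPEC =====
-- Pre_ excludes exactly the inputs where Python A raises IndexError (an invalid vertA/vertB, or an
-- access past the end of a ragged row), plus ONE corner on which A still returns: undirected with an
-- invalid vertB that A never evaluates because row A[vertA] has no positive entry (A returns [],
-- while B's eager set build over A[vertB] raises IndexError there).
def Pre_find_common_neighbors (A : List (List Int)) (vertA : Int) (vertB : Int) (undirected : Bool) : Prop :=
  if undirected then
    (-(A.length : Int) ≤ vertA ∧ vertA < (A.length : Int)) ∧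
    (-(A.length : Int) ≤ vertB ∧ vertB < (A.length : Int)) ∧
    (∀ k, k < (PySem.List.pyGetD A vertA []).length →
      PySem.List.pyGetD (PySem.List.pyGetD A vertA []) (k : Int) 0 > 0 →
      k < (PySem.List.pyGetD A vertB []).length)
  else
    (-(A.length : Int) ≤ vertB ∧ vertB < (A.length : Int)) ∧
    (∀ k, k < (PySem.List.pyGetD A vertB []).length →
      PySem.List.pyGetD (PySem.List.pyGetD A vertB []) (k : Int) 0 > 0 →
      k < A.length ∧
      -((PySem.List.pyGetD A (k : Int) []).length : Int) ≤ vertA ∧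
      vertA < ((PySem.List.pyGetD A (k : Int) []).length : Int))
instance (A : List (List Int)) (vertA : Int) (vertB : Int) (undirected : Bool) : Decidable (Pre_find_common_neighbors A vertA vertB undirected) := by unfold Pre_find_common_neighbors; infer_instance
def pvWitness_find_common_neighbors : List (List Int) × Int × Int × Bool := ([[1, 1], [1, 0]], 0, 1, true)

def Spec_find_common_neighbors (A : List (List Int)) (vertA : Int) (vertB : Int) (undirected : Bool) (out : List Int) : Prop := out = find_common_neighbors_alt A vertA vertB undirected
instance (A : List (List Int)) (vertA : Int) (vertB : Int) (undirected : Bool) (out : List Int) : Decidable (Spec_find_common_neighbors A vertA vertB undirected out) := by unfold Spec_find_common_neighbors; infer_instance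

-- ===== CLAIM (what is proved, stated in full; the proofs are below) =====
def Claim_equal_find_common_neighbors : Prop := ∀ (A : List (List Int)) (vertA : Int) (vertB : Int) (undirected : Bool), Dom_find_common_neighbors A vertA vertB undirected → Pre_find_common_neighbors A vertA vertB undirected → Spec_find_common_neighbors A vertA vertB undirected (find_common_neighbors A vertA vertB undirected)

-- ===== LEMMAS AND PROOFS =====
lemma pvIdx_pairwise (row : List Int) (q : Int × Int → Bool) :
    (((PySem.List.enumerate row 0).filter q).map (fun p => p.1)).Pairwise (· < ·) := by
  rw [List.pairwise_map]
  exact (PySem.List.pairwise_lt_enumerate row 0).filter q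

lemma pvIdx_nodup (row : List Int) (q : Int × Int → Bool) :
    (((PySem.List.enumerate row 0).filter q).map (fun p => p.1)).Nodup :=
  (pvIdx_pairwise row q).imp (fun hlt => ne_of_lt hlt)

lemma pvPosSet_eq (row : List Int) :
    pvPosSet row
      = ((PySem.List.enumerate row 0).filter (fun p => decide (p.2 > 0))).map (fun p => p.1) :=
  PySem.Set.ofList_eq_self_of_nodup _ (pvIdx_nodup row _)

lemma mem_pvIdx (row : List Int) (q : Int × Int → Bool) (i : Int) :
    i ∈ (((PySem.List.enumerate row 0).filter q).map (fun p => p.1))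
      ↔ ∃ k : Nat, k < row.length ∧ i = (k : Int) ∧ q ((k : Int), row.getD k 0) = true := by
  simp [List.mem_map, List.mem_filter, PySem.List.mem_enumerate_iff]
  constructor
  · rintro ⟨k, rfl, hk, h⟩
    exact ⟨k, hk, rfl, by simpa [List.getD, List.getElem?_eq_getElem hk] using h⟩
  · rintro ⟨k, hk, rfl, h⟩
    exact ⟨k, rfl, hk, by simpa [List.getD, List.getElem?_eq_getElem hk] using h⟩

lemma nodup_pvPosSet (row : List Int) : (pvPosSet row).Nodup :=
  PySem.Set.nodup_ofList _

lemma mem_pvPosSet (row : List Int) (i : Int) :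
    i ∈ pvPosSet row ↔ ∃ k : Nat, k < row.length ∧ i = (k : Int) ∧ 0 < row.getD k 0 := by
  rw [pvPosSet_eq, mem_pvIdx]
  simp

theorem find_common_neighbors_spec : Claim_equal_find_common_neighbors := by
  intro A vertA vertB undirected hDom hPre
  unfold Spec_find_common_neighbors find_common_neighbors find_common_neighbors_alt
  cases undirected with
  | true =>
    simp only [if_true]
    simp only [Pre_find_common_neighbors, if_true] at hPre
    obtain ⟨hA, hB, hK⟩ := hPre
    rw [PySem.List.foldl_append_ite
      (p := fun p : Int × Int => p.2 > 0 ∧ PySem.List.pyGetD (PySem.List.pyGetD A vertB []) p.1 0 > 0)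
      (f := fun p : Int × Int => p.1), List.nil_append]
    refine (PySem.List.sorted_eq_of_perm_of_pairwise_lt _ _ _ ?_ (pvIdx_pairwise _ _)).symm
    rw [List.perm_ext_iff_of_nodup (pvIdx_nodup _ _)
      (PySem.Set.nodup_inter _ _ (nodup_pvPosSet _))]
    intro i
    rw [mem_pvIdx, PySem.Set.mem_inter, mem_pvPosSet, mem_pvPosSet]
    constructor
    · rintro ⟨k, hk, rfl, h⟩
      rw [decide_eq_true_iff] at h
      obtain ⟨h1, h2⟩ := h
      have hkB : k < (PySem.List.pyGetD A vertB []).length := hK k hk (by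
        simpa [PySem.List.pyGetD_natCast, List.getD, List.getElem?_eq_getElem hk] using h1)
      refine ⟨⟨k, hk, rfl, h1⟩, ⟨k, hkB, rfl, ?_⟩⟩
      simpa [PySem.List.pyGetD_natCast] using h2
    · rintro ⟨⟨k, hk, rfl, h1⟩, ⟨k', hk', hkk, h2⟩⟩
      have hke : k' = k := by exact_mod_cast hkk.symm
      rw [hke] at h2
      refine ⟨k, hk, rfl, ?_⟩
      rw [decide_eq_true_iff]
      exact ⟨h1, by simpa [PySem.List.pyGetD_natCast] using h2⟩
  | false =>
    simp only [Bool.false_eq_true, if_false]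
    rw [PySem.List.foldl_append_ite
      (p := fun p : Int × Int => p.2 > 0 ∧ PySem.List.pyGetD (PySem.List.pyGetD A p.1 []) vertA 0 > 0)
      (f := fun p : Int × Int => p.1), List.nil_append]
    refine (PySem.List.sorted_eq_of_perm_of_pairwise_lt _ _ _ ?_ (pvIdx_pairwise _ _)).symm
    rw [pvPosSet_eq]
    rw [List.perm_ext_iff_of_nodup (pvIdx_nodup _ _) ((pvIdx_nodup _ _).filter _)]
    intro i
    rw [mem_pvIdx, List.mem_filter, mem_pvIdx]
    constructor
    · rintro ⟨k, hk, rfl, h⟩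
      rw [decide_eq_true_iff] at h
      exact ⟨⟨k, hk, rfl, by simpa using h.1⟩, by simpa using h.2⟩
    · rintro ⟨⟨k, hk, rfl, h1⟩, h2⟩
      refine ⟨k, hk, rfl, ?_⟩
      rw [decide_eq_true_iff]
      exact ⟨by simpa using h1, by simpa using h2⟩
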